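-- pv_equiv track=rewrite | github.com/VladMarianCimpeanu/SMBUD-project | MongoDB_assignment/webapp/app.py | wrap_html
-- ===== SOURCE A (Python) =====
-- def wrap_html(doc, class_names):
--     html_string = ""
--     for class_name in class_names:
--         html_string += "<div class=" + class_name + ">"
--     html_string += doc
--     for class_name in class_names:
--         html_string += "</div>"
--     return html_string
-- ===== SOURCE B (Python) =====
-- def wrap_html(doc, class_names):
--     cs = list(class_names)
--     n = len(cs)
--     if n == 0:
--         return doc
--     if n == 1:
--         return "<div class=" + cs[0] + ">" + doc + "</div>"
--     mid = n // 2
--     return wrap_html(wrap_html(doc, cs[mid:]), cs[:mid])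
-- ===== Notes on version B (the rewrite author's own statement) =====
-- stated objective: alternative
-- what changed: Replaced A's two sequential accumulation loops (all open tags, then doc, then all close tags) by a divide-and-conquer recursion that nests the second half of the class list inside the first half, with a single-tag base case.
import Mathlib
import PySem

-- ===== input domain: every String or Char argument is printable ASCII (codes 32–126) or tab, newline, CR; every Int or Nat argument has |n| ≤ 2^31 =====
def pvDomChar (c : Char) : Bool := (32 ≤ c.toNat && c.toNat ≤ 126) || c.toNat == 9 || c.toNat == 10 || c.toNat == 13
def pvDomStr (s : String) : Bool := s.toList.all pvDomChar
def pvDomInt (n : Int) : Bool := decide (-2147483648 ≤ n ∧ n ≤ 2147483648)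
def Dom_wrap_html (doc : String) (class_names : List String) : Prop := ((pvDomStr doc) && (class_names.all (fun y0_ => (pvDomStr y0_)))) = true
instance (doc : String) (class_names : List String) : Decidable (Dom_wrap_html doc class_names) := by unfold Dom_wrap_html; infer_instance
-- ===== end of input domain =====

-- B replaces A's two sequential accumulation loops by a divide-and-conquer recursion:
-- the second half of the class list is nested inside the first half ("alternative").

-- ===== PORT A =====
-- transliteration of A: first loop appends open tags, then doc, then second loop appends close tags
def wrap_html (doc : String) (class_names : List String) : String :=
  let html1 := class_names.foldl (fun acc c => acc ++ ("<div class=" ++ c ++ ">")) ""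
  let html2 := html1 ++ doc
  class_names.foldl (fun acc _ => acc ++ "</div>") html2

-- ===== PORT B =====
-- transliteration of Source B's divide-and-conquer: base cases for 0 and 1 class names,
-- otherwise nest the second half (cs[mid:]) inside the first half (cs[:mid])
def wrap_html_alt (doc : String) (class_names : List String) : String :=
  match class_names with
  | [] => doc
  | [c] => "<div class=" ++ c ++ ">" ++ doc ++ "</div>"
  | a :: b :: rest =>
      let cs := a :: b :: rest
      let mid := cs.length / 2
      wrap_html_alt (wrap_html_alt doc (cs.drop mid)) (cs.take mid)
termination_by class_names.length
decreasing_by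
  · simp; omega
  · simp; omega

-- ===== PRECONDITION & SPEC =====
def Spec_wrap_html (doc : String) (class_names : List String) (out : String) : Prop := out = wrap_html_alt doc class_names
instance (doc : String) (class_names : List String) (out : String) : Decidable (Spec_wrap_html doc class_names out) := by unfold Spec_wrap_html; infer_instance

-- ===== CLAIM (what is proved, stated in full; the proofs are below) =====
def Claim_equal_wrap_html : Prop := ∀ (doc : String) (class_names : List String), Dom_wrap_html doc class_names → Spec_wrap_html doc class_names (wrap_html doc class_names)

-- ===== LEMMAS AND PROOFS =====

def opensF (cs : List String) : String :=
  cs.foldl (fun a c => a ++ ("<div class=" ++ c ++ ">")) ""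

def closesF (cs : List String) : String :=
  cs.foldl (fun a _ => a ++ "</div>") ""

theorem foldl_open_shift (cs : List String) (acc : String) :
    cs.foldl (fun a c => a ++ ("<div class=" ++ c ++ ">")) acc = acc ++ opensF cs := by
  induction cs generalizing acc with
  | nil => simp [opensF]
  | cons c rest ih =>
      simp only [opensF, List.foldl_cons]
      rw [ih (acc ++ ("<div class=" ++ c ++ ">")), ih ("" ++ ("<div class=" ++ c ++ ">"))]
      simp [String.append_assoc]

theorem foldl_close_shift (cs : List String) (acc : String) :
    cs.foldl (fun a _ => a ++ "</div>") acc = acc ++ closesF cs := by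
  induction cs generalizing acc with
  | nil => simp [closesF]
  | cons c rest ih =>
      simp only [closesF, List.foldl_cons]
      rw [ih (acc ++ "</div>"), ih ("" ++ "</div>")]
      simp [String.append_assoc]

theorem opensF_append (l1 l2 : List String) :
    opensF (l1 ++ l2) = opensF l1 ++ opensF l2 := by
  rw [opensF, List.foldl_append, foldl_open_shift]
  rfl

theorem closesF_append (l1 l2 : List String) :
    closesF (l1 ++ l2) = closesF l1 ++ closesF l2 := by
  rw [closesF, List.foldl_append, foldl_close_shift]
  rfl

def closePow : Nat → String
  | 0 => ""
  | n + 1 => "</div>" ++ closePow n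

theorem closesF_eq_pow (l : List String) : closesF l = closePow l.length := by
  induction l with
  | nil => simp [closesF, closePow]
  | cons c rest ih =>
      rw [closesF, List.foldl_cons, foldl_close_shift, String.empty_append, ih,
          List.length_cons]
      rfl

theorem closePow_add (m n : Nat) : closePow (m + n) = closePow m ++ closePow n := by
  induction m with
  | zero => simp [closePow]
  | succ k ih => rw [Nat.succ_add, closePow, closePow, ih, String.append_assoc]

theorem wrap_html_eq (doc : String) (cs : List String) :
    wrap_html doc cs = opensF cs ++ doc ++ closesF cs := by
  rw [wrap_html]
  exact foldl_close_shift cs _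

theorem alt_eq (doc : String) (cs : List String) :
    wrap_html_alt doc cs = opensF cs ++ doc ++ closesF cs := by
  fun_induction wrap_html_alt with
  | case1 doc => simp [opensF, closesF]
  | case2 doc c => simp [opensF, closesF, String.append_assoc]
  | case3 doc a b rest cs mid ih1 ih2 ih3 =>
      rw [ih3, ih1]
      conv_rhs => rw [show (a :: b :: rest : List String) = List.take mid cs ++ List.drop mid cs from (List.take_append_drop mid cs).symm]
      rw [opensF_append, closesF_append]
      simp only [String.append_assoc]
      rw [closesF_eq_pow (List.drop mid cs), closesF_eq_pow (List.take mid cs),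
          ← closePow_add, Nat.add_comm, closePow_add]

theorem main_eq (doc : String) (cs : List String) :
    wrap_html doc cs = wrap_html_alt doc cs := by
  rw [wrap_html_eq, alt_eq]

-- ===== VERDICT (by name: the statement is the Claim_ definition above) =====
theorem wrap_html_spec : Claim_equal_wrap_html := by
  intro doc cs _
  exact main_eq doc cs
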